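-- pv_equiv track=rewrite | github.com/natelson/codes_python_interview | string_questions/sort_strings.py | orderString
-- ===== SOURCE A (Python) =====
-- def orderString(word):
--     charCount = [0]*len(word)
--
--     for i in range(len(word)):
--         charCount[i] = ord(word[i])
--
--     charCount = sorted(charCount)
--
--     charCount = charCount[::-1]
--     new_string = ''
--     for i in range(len(charCount)):
--         new_string += chr(charCount[i])
--
--     return new_string
-- ===== SOURCE B (Python) =====
-- def orderString(word):
--     counts = {}
--     for ch in word:
--         counts[ch] = counts.get(ch, 0) + 1
--     parts = []
--     for ch in sorted(counts, reverse=True):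
--         parts.append(ch * counts[ch])
--     return ''.join(parts)
-- ===== Notes on version B (the rewrite author's own statement) =====
-- stated objective: faster
-- what changed: B builds a character frequency table in one pass, sorts only the distinct characters descending, and expands each by its count, instead of sorting all n code points and mapping them back through chr.
import Mathlib
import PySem

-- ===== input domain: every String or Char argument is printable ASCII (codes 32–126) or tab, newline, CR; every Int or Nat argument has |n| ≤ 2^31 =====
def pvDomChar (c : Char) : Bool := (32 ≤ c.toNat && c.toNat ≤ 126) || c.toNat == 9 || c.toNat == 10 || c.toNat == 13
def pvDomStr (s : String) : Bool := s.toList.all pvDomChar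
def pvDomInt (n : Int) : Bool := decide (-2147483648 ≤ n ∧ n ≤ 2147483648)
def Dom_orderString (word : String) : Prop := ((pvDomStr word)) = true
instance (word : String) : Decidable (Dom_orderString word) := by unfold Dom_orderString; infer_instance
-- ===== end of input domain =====

-- B replaces 'sort all n code points, then map back through chr' by 'count characters once,
-- sort only the distinct characters descending, expand each by its count' (alternative algorithm).

-- ===== PORT A =====
-- ord(c) on a Char (code point as a Python int)
def pyOrd (c : Char) : Int := (c.toNat : Int)

def orderString (word : String) : String :=
  let cs := word.toList
  -- charCount = [0]*len(word)
  let charCount : List Int := List.replicate cs.length 0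
  -- for i in range(len(word)): charCount[i] = ord(word[i])   (i runs over valid indices, so
  -- i.toNat is exact here and the default of pyGetD is never used)
  let charCount := (PySem.List.pyRange 0 (cs.length : Int) 1).foldl
    (fun acc i => acc.set i.toNat (pyOrd (PySem.List.pyGetD cs i ' '))) charCount
  -- charCount = sorted(charCount)
  let charCount := PySem.List.sorted charCount (fun x => x) false
  -- charCount = charCount[::-1]
  let charCount := (PySem.List.slice? charCount none none (-1)).getD []
  -- new_string = ''; for i in range(len(charCount)): new_string += chr(charCount[i])
  -- (chr ported as Char.ofNat: exact here, every entry is the code point of a Char)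
  let out := (PySem.List.pyRange 0 (charCount.length : Int) 1).foldl
    (fun acc i => acc ++ [Char.ofNat (PySem.List.pyGetD charCount i 0).toNat]) ([] : List Char)
  String.ofList out

-- ===== PORT B =====
def orderString_alt (word : String) : String :=
  -- counts = {}; for ch in word: counts[ch] = counts.get(ch, 0) + 1
  let counts := word.toList.foldl (fun d ch => d.insert ch (d.getD ch 0 + 1))
      (PySem.Dict.empty : PySem.Dict Char Int)
  -- parts = []; for ch in sorted(counts, reverse=True): parts.append(ch * counts[ch])
  let parts := (PySem.List.sorted counts.keys (fun c => c) true).foldl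
      (fun acc ch => acc ++ [List.replicate (counts.getD ch 0).toNat ch]) ([] : List (List Char))
  -- return ''.join(parts)
  String.ofList (PySem.Chars.join [] parts)

-- ===== PRECONDITION & SPEC =====
def Spec_orderString (word : String) (out : String) : Prop := out = orderString_alt word
instance (word : String) (out : String) : Decidable (Spec_orderString word out) := by unfold Spec_orderString; infer_instance

-- ===== CLAIM (what is proved, stated in full; the proofs are below) =====
def Claim_equal_orderString : Prop := ∀ (word : String), Dom_orderString word → Spec_orderString word (orderString word)

-- ===== LEMMAS AND PROOFS =====

-- the fill loop of A writes ord(word[i]) into slot i: from index k on it is just a map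
lemma fill_loop (cs : List Char) : ∀ (m k : Nat) (acc : List Int), acc.length = cs.length →
    cs.length - k = m →
    (PySem.List.pyRange (k : Int) (cs.length : Int) 1).foldl
      (fun acc i => acc.set i.toNat (pyOrd (PySem.List.pyGetD cs i ' '))) acc
    = acc.take k ++ (cs.drop k).map pyOrd := by
  intro m
  induction m with
  | zero =>
    intro k acc hlen hm
    have hk : cs.length ≤ k := by omega
    rw [PySem.List.pyRange_one_eq_nil (by exact_mod_cast hk)]
    rw [List.take_of_length_le (by omega), List.drop_of_length_le hk]
    simp
  | succ m ih =>
    intro k acc hlen hm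
    have hk : k < cs.length := by omega
    rw [PySem.List.pyRange_one_cons (by exact_mod_cast hk)]
    simp only [List.foldl_cons]
    have hcast : ((k : Int) + 1) = ((k + 1 : Nat) : Int) := by push_cast; ring
    rw [hcast, ih (k + 1) _ (by simp [hlen, hk]) (by omega)]
    have hget : PySem.List.pyGetD cs (k : Int) ' ' = cs[k] := by
      rw [PySem.List.pyGetD_natCast, List.getD_eq_getElem cs ' ' hk]
    have hset : acc.set ((k : Int)).toNat (pyOrd cs[k]) =
        acc.take k ++ pyOrd cs[k] :: acc.drop (k + 1) := by
      rw [Int.toNat_natCast, List.set_eq_take_append_cons_drop]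
      simp [hlen, hk]
    rw [hget, hset]
    have hdrop : cs.drop k = cs[k] :: cs.drop (k + 1) := List.drop_eq_getElem_cons hk
    rw [hdrop]
    have hxl : (acc.take k).length = k := by simp; omega
    have htake : (acc.take k ++ pyOrd cs[k] :: acc.drop (k + 1)).take (k + 1)
        = acc.take k ++ [pyOrd cs[k]] := by
      rw [List.take_append, hxl]
      simp [List.take_take]
    rw [htake]
    have hdm : (cs.map pyOrd).drop k = pyOrd cs[k] :: (cs.map pyOrd).drop (k + 1) := by
      rw [List.drop_eq_getElem_cons (by simpa using hk)]
      simp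
    simp [hdm]

-- A's result, characterised: map chr over the descending sort of the code points
lemma orderString_eq (word : String) :
    orderString word = String.ofList
      (((PySem.List.sorted (word.toList.map pyOrd) (fun x => x) false).reverse).map
        (fun v => Char.ofNat v.toNat)) := by
  have hfill : (PySem.List.pyRange 0 (word.toList.length : Int) 1).foldl
      (fun acc i => acc.set i.toNat (pyOrd (PySem.List.pyGetD word.toList i ' ')))
      (List.replicate word.toList.length 0) = word.toList.map pyOrd := by
    have h := fill_loop word.toList word.toList.length 0 (List.replicate word.toList.length 0)
      (by simp) (by omega)
    simpa using h
  simp only [orderString]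
  rw [hfill, PySem.List.slice?_none_none_neg_one]
  simp only [Option.getD_some]
  rw [PySem.List.foldl_pyRange_zero_pyGetD'
    ((PySem.List.sorted (word.toList.map pyOrd) (fun x => x) false).reverse) 0
    (fun acc v => acc ++ [Char.ofNat v.toNat]) []]
  rw [PySem.List.foldl_append_singleton_eq_map]
  simp

-- B's result, characterised: blocks of repeated characters, distinct keys sorted descending
lemma orderString_alt_eq (word : String) :
    orderString_alt word = String.ofList
      (((PySem.List.sorted (PySem.Set.ofList word.toList) (fun c => c) true).map
        (fun c => List.replicate (word.toList.count c) c)).flatten) := by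
  simp only [orderString_alt]
  rw [PySem.Dict.foldl_insert_getD_add_one_eq_counter, PySem.Dict.keys_counter]
  rw [PySem.List.foldl_append_singleton_eq_map]
  have hjoin : ∀ (l : List (List Char)), PySem.Chars.join [] l = l.flatten := by
    intro l
    induction l with
    | nil => rfl
    | cons a t ih => cases t <;> simp_all [PySem.Chars.join_cons_cons, PySem.Chars.join_singleton]
  rw [List.nil_append, hjoin]
  apply congrArg
  apply congrArg
  apply List.map_congr_left
  intro c _
  rw [PySem.Dict.getD_counter]
  simp

-- counting the elements of the expanded blocks (keys distinct)
lemma count_flatten_replicate (g : Char → Nat) (a : Char) :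
    ∀ (S : List Char), S.Nodup →
    ((S.map (fun c => List.replicate (g c) c)).flatten).count a = if a ∈ S then g a else 0 := by
  intro S
  induction S with
  | nil => simp
  | cons c rest ih =>
    intro hnd
    simp only [List.map_cons, List.flatten_cons, List.count_append,
      ih (List.nodup_cons.mp hnd).2, List.count_replicate]
    by_cases hac : a = c
    · subst hac
      have : a ∉ rest := (List.nodup_cons.mp hnd).1
      simp [this]
    · simp [hac, Ne.symm hac, List.mem_cons]

-- the expanded blocks are pairwise descending when the keys are
lemma pairwise_flatten_replicate (g : Char → Nat) :
    ∀ (S : List Char), S.Pairwise (fun a b => b ≤ a) →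
    ((S.map (fun c => List.replicate (g c) c)).flatten).Pairwise (fun a b : Char => b ≤ a) := by
  intro S
  induction S with
  | nil => simp
  | cons c rest ih =>
    intro hp
    obtain ⟨hhead, htail⟩ := List.pairwise_cons.mp hp
    simp only [List.map_cons, List.flatten_cons]
    apply List.pairwise_append.mpr
    refine ⟨?_, ih htail, ?_⟩
    · exact List.pairwise_replicate.mpr (Or.inr le_rfl)
    · intro a ha b hb
      have hac : a = c := (List.eq_of_mem_replicate ha)
      obtain ⟨l, hl, hbl⟩ := List.mem_flatten.mp hb
      obtain ⟨d, hd, hdl⟩ := List.mem_map.mp hl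
      subst hdl
      have hbd : b = d := List.eq_of_mem_replicate hbl
      subst hac hbd
      exact hhead b hd

-- the descending sort of the code points IS the expanded block list, read through ord
lemma main_lists (cs : List Char) :
    (PySem.List.sorted (cs.map pyOrd) (fun x => x) false).reverse =
    (((PySem.List.sorted (PySem.Set.ofList cs) (fun c => c) true).map
      (fun c => List.replicate (cs.count c) c)).flatten).map pyOrd := by
  set S := PySem.List.sorted (PySem.Set.ofList cs) (fun c => c) true with hS
  set LB := ((S.map (fun c => List.replicate (cs.count c) c)).flatten) with hLB
  have hSnd : S.Nodup :=
    (PySem.List.sorted_perm (PySem.Set.ofList cs) _ true).nodup_iff.mpr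
      (PySem.Set.nodup_ofList cs)
  have hSmem : ∀ a, a ∈ S ↔ a ∈ cs := by
    intro a
    rw [hS, PySem.List.mem_sorted, PySem.Set.mem_ofList]
  -- LB is a permutation of cs
  have hperm : LB.Perm cs := by
    rw [List.perm_iff_count]
    intro a
    rw [hLB, count_flatten_replicate _ a S hSnd]
    by_cases ha : a ∈ S
    · simp [ha]
    · have : a ∉ cs := fun h => ha ((hSmem a).mpr h)
      simp [ha, List.count_eq_zero_of_not_mem this]
  -- LB is descending
  have hpw : LB.Pairwise (fun a b : Char => b ≤ a) := by
    rw [hLB]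
    exact pairwise_flatten_replicate _ S (PySem.List.sorted_pairwise_rev _ _)
  -- both sides are descending permutations of cs.map pyOrd, over Int
  apply List.Perm.eq_of_pairwise (le := fun a b : Int => b ≤ a)
  · intro a b _ _ h1 h2; omega
  · rw [List.pairwise_reverse]
    exact PySem.List.sorted_pairwise (cs.map pyOrd) (fun x => x)
  · exact List.pairwise_map.mpr (hpw.imp (fun h => by
      simpa [pyOrd] using Fin.mk_le_mk.mp h))
  · exact ((PySem.List.sorted (cs.map pyOrd) (fun x => x) false).reverse_perm.trans
      (PySem.List.sorted_perm (cs.map pyOrd) (fun x => x) false)).trans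
      ((hperm.map pyOrd).symm)

-- ===== VERDICT (by name: the statement is the Claim_ definition above) =====
theorem orderString_spec : Claim_equal_orderString := by
  intro word _
  unfold Spec_orderString
  rw [orderString_eq, orderString_alt_eq, main_lists]
  congr 1
  rw [List.map_map]
  simp [Function.comp_def, pyOrd, Char.ofNat_toNat]
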